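-- pv_equiv track=rewrite | github.com/okuznets/home_works | kuznetsova/HW5/HW5.py | shift_alphabet
-- ===== SOURCE A (Python) =====
-- import string
--
-- alphabet_en_low_or = list(string.ascii_lowercase)
--
-- alphabet_en_up_or = list(string.ascii_uppercase)
--
-- def shift_alphabet(shift,flag): # Function is creating alphabet for encryption (flag == '1')  or decryption
--     shift = shift%len(alphabet_en_low_or)
--     alphabet_en_low_new = []
--     alphabet_en_up_new = []
--     if flag =='1':
--         min_range = -len(alphabet_en_low_or) + shift
--         max_range = shift
--     else:
--         min_range = -shift
--         max_range = len(alphabet_en_low_or) - shift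
--     for i in range(min_range, max_range):
--         alphabet_en_low_new.append(alphabet_en_low_or[i])
--         alphabet_en_up_new.append(alphabet_en_up_or[i])
--     return alphabet_en_low_new + alphabet_en_up_new
-- ===== SOURCE B (Python) =====
-- import string
--
-- def shift_alphabet(shift, flag):
--     # Rotation start: encryption ('1') starts at shift, decryption at -shift.
--     k = shift % 26 if flag == '1' else (-shift) % 26
--     low = string.ascii_lowercase
--     up = string.ascii_uppercase
--     return list(low[k:] + low[:k]) + list(up[k:] + up[:k])
-- ===== Notes on version B (the rewrite author's own statement) =====
-- stated objective: idiomatic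
-- what changed: B has no element-wise loop at all: it computes one rotation offset k (folding the flag into k's sign), rotates each alphabet string by slice concatenation low[k:]+low[:k], and splits the result with list(); A instead appends letter by letter over a negative-index range.
import Mathlib
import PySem

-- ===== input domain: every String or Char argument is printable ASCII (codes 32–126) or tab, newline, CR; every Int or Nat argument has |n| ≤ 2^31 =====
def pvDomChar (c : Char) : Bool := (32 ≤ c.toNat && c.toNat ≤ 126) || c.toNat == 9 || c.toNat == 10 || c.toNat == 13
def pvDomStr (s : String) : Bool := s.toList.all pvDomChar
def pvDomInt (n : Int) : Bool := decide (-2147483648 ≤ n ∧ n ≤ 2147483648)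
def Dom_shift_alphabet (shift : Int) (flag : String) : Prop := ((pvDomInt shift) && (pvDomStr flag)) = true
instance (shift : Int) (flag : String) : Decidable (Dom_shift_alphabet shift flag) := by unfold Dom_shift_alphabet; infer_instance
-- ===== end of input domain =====

-- B replaces A's letter-by-letter append loop over a negative-index range with a loop-free
-- rotation by slice concatenation (low[k:] + low[:k]) of each alphabet string (idiomatic; same cost).

-- ===== PORT A =====
-- module-level globals: list(string.ascii_lowercase) / list(string.ascii_uppercase)
def pvAlphLowOr : List String :=
  ["a","b","c","d","e","f","g","h","i","j","k","l","m","n","o","p","q","r","s","t","u","v","w","x","y","z"]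
def pvAlphUpOr : List String :=
  ["A","B","C","D","E","F","G","H","I","J","K","L","M","N","O","P","Q","R","S","T","U","V","W","X","Y","Z"]

-- literal port of A; the indexed accesses are always in range (shift%26 ∈ [0,26)), so .getD "" is never taken
def shift_alphabet (shift : Int) (flag : String) : List String :=
  let s := PySem.Int.mod shift 26
  let mm : Int × Int := if flag == "1" then (-26 + s, s) else (-s, 26 - s)
  let st := (PySem.List.pyRange mm.1 mm.2 1).foldl
    (fun (ac : List String × List String) i =>
      (ac.1 ++ [(PySem.List.pyGet? pvAlphLowOr i).getD ""],
       ac.2 ++ [(PySem.List.pyGet? pvAlphUpOr i).getD ""])) ([], [])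
  st.1 ++ st.2

-- ===== PORT B =====
-- Source B: k = shift%26 if flag=='1' else (-shift)%26; return list(low[k:]+low[:k]) + list(up[k:]+up[:k])
def pvLowStr : List Char := "abcdefghijklmnopqrstuvwxyz".toList
def pvUpStr : List Char := "ABCDEFGHIJKLMNOPQRSTUVWXYZ".toList

-- list(<str>) yields the single-character strings, hence the final .map
def shift_alphabet_alt (shift : Int) (flag : String) : List String :=
  let k := if flag == "1" then PySem.Int.mod shift 26 else PySem.Int.mod (-shift) 26
  ((PySem.List.slice pvLowStr (some k) none ++ PySem.List.slice pvLowStr none (some k)).map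
      (fun c => String.ofList [c])) ++
  ((PySem.List.slice pvUpStr (some k) none ++ PySem.List.slice pvUpStr none (some k)).map
      (fun c => String.ofList [c]))

-- ===== PRECONDITION & SPEC =====
def Spec_shift_alphabet (shift : Int) (flag : String) (out : List String) : Prop := out = shift_alphabet_alt shift flag
instance (shift : Int) (flag : String) (out : List String) : Decidable (Spec_shift_alphabet shift flag out) := by unfold Spec_shift_alphabet; infer_instance

-- ===== CLAIM =====
def Claim_equal_shift_alphabet : Prop := ∀ (shift : Int) (flag : String), Dom_shift_alphabet shift flag → Spec_shift_alphabet shift flag (shift_alphabet shift flag)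

-- ===== LEMMAS AND PROOFS =====

theorem shift_alphabet_eq (shift : Int) (flag : String) :
    shift_alphabet shift flag = shift_alphabet_alt shift flag := by
  have h26 : (0:Int) < 26 := by norm_num
  have hmod : ∀ x : Int, PySem.Int.mod x 26 = x % 26 := fun x => PySem.Int.mod_eq_emod_of_pos h26
  have h0 : 0 ≤ PySem.Int.mod shift 26 := by rw [hmod]; exact Int.emod_nonneg _ (by norm_num)
  have h1 : PySem.Int.mod shift 26 < 26 := by rw [hmod]; exact Int.emod_lt_of_pos _ h26
  have hk : PySem.Int.mod (-shift) 26 = PySem.Int.mod (26 - PySem.Int.mod shift 26) 26 := by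
    simp only [hmod]; omega
  unfold shift_alphabet shift_alphabet_alt
  rw [hk]
  generalize hgen : PySem.Int.mod shift 26 = s at h0 h1 ⊢
  cases hb : (flag == "1") <;> simp only [hb, if_true, Bool.false_eq_true, if_false] <;>
    interval_cases s <;> decide

-- ===== VERDICT =====
theorem shift_alphabet_spec : Claim_equal_shift_alphabet := by
  intro shift flag _
  unfold Spec_shift_alphabet
  exact shift_alphabet_eq shift flag
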